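-- pv_equiv track=rewrite | github.com/Ryuksito/Automatas | 03_test_pumping_lemma.py | regla_a_n_b_n
-- ===== SOURCE A (Python) =====
-- def regla_a_n_b_n(s):
--     """
--     Regla que define el lenguaje a^n b^n: el número de 'a's debe ser igual al número de 'b's
--     y todas las 'a's deben preceder a las 'b's.
--     """
--     num_a = 0
--     num_b = 0
--     i = 0
--     while i < len(s) and s[i] == 'a':
--         num_a += 1
--         i += 1
--     while i < len(s) and s[i] == 'b':
--         num_b += 1
--         i += 1
--     return i == len(s) and num_a == num_b
--
-- s = 'aaaaaaabbbb'
-- ===== SOURCE B (Python) =====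
-- def regla_a_n_b_n(s):
--     half = len(s) // 2
--     return len(s) % 2 == 0 and s[:half] == 'a' * half and s[half:] == 'b' * half
-- ===== Notes on version B (the rewrite author's own statement) =====
-- stated objective: simpler
-- what changed: Replaces the two index-driven leading-scan while loops with a closed-form check: even length, first half equals 'a'*half, second half equals 'b'*half.
import Mathlib
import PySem

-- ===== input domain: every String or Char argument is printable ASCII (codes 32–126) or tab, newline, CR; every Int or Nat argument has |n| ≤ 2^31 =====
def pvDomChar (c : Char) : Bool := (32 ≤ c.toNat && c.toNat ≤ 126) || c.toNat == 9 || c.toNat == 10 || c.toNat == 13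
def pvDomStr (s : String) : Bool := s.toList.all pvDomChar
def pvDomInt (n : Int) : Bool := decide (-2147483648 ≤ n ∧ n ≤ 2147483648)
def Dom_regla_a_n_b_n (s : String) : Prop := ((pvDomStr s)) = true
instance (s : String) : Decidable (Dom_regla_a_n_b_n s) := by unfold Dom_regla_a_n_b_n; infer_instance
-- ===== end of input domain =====

-- B replaces A's two index-driven leading-scan while loops with a closed-form check
-- (even length, first half all 'a', second half all 'b'); objective: simpler.

-- ===== PORT A =====
-- one while loop of A: `while i < len(s) and s[i] == ch: num += 1; i += 1`
-- (A runs it twice, with ch = 'a' and then ch = 'b'); returns (num, i).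
-- s[i] is only read under the guard i < len(s), so direct indexing is exact.
def pvScan (cs : List Char) (ch : Char) (num i : Nat) : Nat × Nat :=
  if h : i < cs.length then
    if cs[i] == ch then pvScan cs ch (num + 1) (i + 1)
    else (num, i)
  else (num, i)
  termination_by cs.length - i

def regla_a_n_b_n (s : String) : Bool :=
  let cs := s.toList
  let r1 := pvScan cs 'a' 0 0           -- (num_a, i) after the first while loop
  let r2 := pvScan cs 'b' 0 r1.2        -- (num_b, i) after the second while loop
  decide (r2.2 = cs.length) && decide (r1.1 = r2.1)

-- ===== PORT B =====
-- half = len(s)//2; len even, s[:half] == 'a'*half, s[half:] == 'b'*half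
-- (string slices / 'a'*half are List.take / List.drop / List.replicate on s.toList — exact)
def regla_a_n_b_n_alt (s : String) : Bool :=
  let cs := s.toList
  let half := cs.length / 2
  decide (cs.length % 2 = 0) &&
    (cs.take half == List.replicate half 'a') &&
    (cs.drop half == List.replicate half 'b')

-- ===== PRECONDITION & SPEC =====
def Spec_regla_a_n_b_n (s : String) (out : Bool) : Prop := out = regla_a_n_b_n_alt s
instance (s : String) (out : Bool) : Decidable (Spec_regla_a_n_b_n s out) := by unfold Spec_regla_a_n_b_n; infer_instance

-- ===== CLAIM (what is proved, stated in full; the proofs are below) =====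
def Claim_equal_regla_a_n_b_n : Prop := ∀ (s : String), Dom_regla_a_n_b_n s → Spec_regla_a_n_b_n s (regla_a_n_b_n s)

-- ===== LEMMAS AND PROOFS =====

-- the scan loop counts the leading run of `ch` starting at position i
theorem pvScan_spec (cs : List Char) (ch : Char) (num i : Nat) :
    pvScan cs ch num i =
      (num + ((cs.drop i).takeWhile (fun c => c == ch)).length,
       i + ((cs.drop i).takeWhile (fun c => c == ch)).length) := by
  unfold pvScan
  by_cases h : i < cs.length
  · rw [List.drop_eq_getElem_cons h]
    by_cases ha : cs[i] == ch
    · simp only [h, dif_pos, ha, if_pos, List.takeWhile_cons_of_pos, List.length_cons]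
      rw [pvScan_spec cs ch (num + 1) (i + 1)]
      simp only [Prod.mk.injEq]
      omega
    · simp [h, ha]
  · simp [h, List.drop_eq_nil_of_le (le_of_not_gt h)]
  termination_by cs.length - i

theorem takeWhile_replicate_append (n : Nat) (ch : Char) (l : List Char) :
    ((List.replicate n ch ++ l).takeWhile (fun c => c == ch)) =
      List.replicate n ch ++ l.takeWhile (fun c => c == ch) := by
  induction n with
  | zero => simp
  | succ k ih => simp [List.replicate_succ, List.takeWhile_cons_of_pos, ih]

-- A = true of the list cs, unfolded via the scan lemma
theorem A_char (cs : List Char) :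
    (let r1 := pvScan cs 'a' 0 0
     let r2 := pvScan cs 'b' 0 r1.2
     (decide (r2.2 = cs.length) && decide (r1.1 = r2.1))) = true
    ↔ (let k := (cs.takeWhile (fun c => c == 'a')).length
       let m := ((cs.drop k).takeWhile (fun c => c == 'b')).length
       k + m = cs.length ∧ k = m) := by
  simp only [pvScan_spec, List.drop_zero, Nat.zero_add, Bool.and_eq_true, decide_eq_true_eq]

theorem main_iff (cs : List Char) :
    (let k := (cs.takeWhile (fun c => c == 'a')).length
     let m := ((cs.drop k).takeWhile (fun c => c == 'b')).length
     k + m = cs.length ∧ k = m)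
    ↔ (cs.length % 2 = 0 ∧
       cs.take (cs.length / 2) = List.replicate (cs.length / 2) 'a' ∧
       cs.drop (cs.length / 2) = List.replicate (cs.length / 2) 'b') := by
  simp only
  constructor
  · rintro ⟨hsum, hkm⟩
    set k := (cs.takeWhile (fun c => c == 'a')).length with hk
    set m := ((cs.drop k).takeWhile (fun c => c == 'b')).length with hm
    have hhalf : cs.length / 2 = k := by omega
    have heven : cs.length % 2 = 0 := by omega
    -- the takeWhile is a prefix of length k, so take k equals it; and it is replicate
    have htw : cs.takeWhile (fun c => c == 'a') = List.replicate k 'a' := by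
      apply List.eq_replicate_of_mem
      intro b hb
      have := List.mem_takeWhile_imp hb
      simpa using this
    have htake : cs.take k = List.replicate k 'a' := by
      have h1 : cs.take k = cs.takeWhile (fun c => c == 'a') := by
        rw [hk]
        exact (List.prefix_iff_eq_take.mp (List.takeWhile_prefix _)).symm
      rw [h1, htw]
    -- drop k has length m = k and its b-takeWhile has full length, so it is all 'b'
    have hdroplen : (cs.drop k).length = m := by
      simp [List.length_drop]; omega
    have hdw : (cs.drop k).takeWhile (fun c => c == 'b') = cs.drop k := by
      apply List.IsPrefix.eq_of_length (List.takeWhile_prefix _)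
      omega
    have hdrop : cs.drop k = List.replicate k 'b' := by
      have hall : ∀ b ∈ cs.drop k, b = 'b' := by
        intro b hb
        rw [← hdw] at hb
        simpa using List.mem_takeWhile_imp hb
      have h2 := List.eq_replicate_of_mem hall
      rw [hdroplen, ← hkm] at h2
      exact h2
    rw [hhalf]
    exact ⟨heven, htake, hdrop⟩
  · rintro ⟨heven, htake, hdrop⟩
    set h2 := cs.length / 2 with hh2
    have hcs : cs = List.replicate h2 'a' ++ List.replicate h2 'b' := by
      rw [← htake, ← hdrop, List.take_append_drop]
    have hk : (cs.takeWhile (fun c => c == 'a')).length = h2 := by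
      rw [hcs, takeWhile_replicate_append]
      cases h2 with
      | zero => simp
      | succ n => simp [List.replicate_succ, List.takeWhile_cons_of_neg]
    have hdrop' : cs.drop ((cs.takeWhile (fun c => c == 'a')).length) = List.replicate h2 'b' := by
      rw [hk, hcs]
      simp
    rw [hdrop']
    have hm : ((List.replicate h2 'b').takeWhile (fun c => c == 'b')).length = h2 := by
      have : (List.replicate h2 'b').takeWhile (fun c => c == 'b') = List.replicate h2 'b' := by
        apply List.takeWhile_eq_self_iff.mpr
        intro a ha
        simp [List.eq_of_mem_replicate ha]
      simp [this]
    refine ⟨?_, by omega⟩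
    have hlen : cs.length = 2 * h2 := by omega
    omega

-- ===== VERDICT (by name: the statement is the Claim_ definition above) =====
theorem regla_a_n_b_n_spec : Claim_equal_regla_a_n_b_n := by
  intro s _
  unfold Spec_regla_a_n_b_n regla_a_n_b_n regla_a_n_b_n_alt
  rw [Bool.eq_iff_iff]
  rw [A_char s.toList]
  rw [main_iff s.toList]
  simp [and_assoc]
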